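-- pv_equiv track=rewrite | github.com/orifjohn/binary_search | mutualfollowers.py | solve
-- ===== SOURCE A (Python) =====
-- def solve(relations):
--     relations = set((tuple(pair) for pair in relations))
--     mutual = set()
--     for x, y in relations:
--         if (y, x) in relations:
--             mutual.add(x)
--             mutual.add(y)
--     return [i for i in range(2 * len(relations) + 2) if i in mutual]
-- ===== SOURCE B (Python) =====
-- def solve(relations):
--     distinct = list(dict.fromkeys(map(tuple, relations)))
--     cnt = {}
--     for x, y in distinct:
--         k = (x, y) if x <= y else (y, x)
--         cnt[k] = cnt.get(k, 0) + 1
--     ends = [v for (a, b), c in cnt.items() if c == 2 or a == b for v in (a, b)]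
--     bound = 2 * len(distinct) + 2
--     return sorted(v for v in dict.fromkeys(ends) if 0 <= v < bound)
-- ===== Notes on version B (the rewrite author's own statement) =====
-- stated objective: alternative
-- what changed: B never probes for the reversed tuple and never scans a numeric range: it deduplicates the pairs in order, counts each pair under a canonical unordered key in a dict, reads mutual pairs off as keys with count 2 (or self-loops), and sorts the clipped endpoint set.
import Mathlib
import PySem

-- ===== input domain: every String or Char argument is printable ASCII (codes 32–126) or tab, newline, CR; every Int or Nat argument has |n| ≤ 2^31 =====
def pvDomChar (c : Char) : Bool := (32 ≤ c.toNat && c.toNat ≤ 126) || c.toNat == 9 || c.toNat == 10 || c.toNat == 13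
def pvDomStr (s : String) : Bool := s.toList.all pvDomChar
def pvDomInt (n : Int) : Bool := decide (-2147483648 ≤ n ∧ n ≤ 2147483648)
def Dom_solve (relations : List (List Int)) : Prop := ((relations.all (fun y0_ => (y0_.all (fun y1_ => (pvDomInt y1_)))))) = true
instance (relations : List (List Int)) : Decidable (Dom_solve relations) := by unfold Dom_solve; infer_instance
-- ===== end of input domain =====

-- B detects mutual pairs by COUNTING orientations under a canonical unordered key (a dict of
-- counters over ordered deduplication) instead of A's reversed-tuple membership probe and
-- range-scan; objective: alternative (no hash-set probing, no range scan), same cost class.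

-- ===== PORT A =====
-- tuple(pair) for a length-2 list (Pre_ guarantees the length)
def pvPair (l : List Int) : Int × Int := (l.getD 0 0, l.getD 1 0)

def solve (relations : List (List Int)) : List Int :=
  let rs : PySem.Set (Int × Int) := PySem.Set.ofList (relations.map pvPair)
  let mtl : PySem.Set Int :=
    rs.foldl (fun m p =>
      if rs.contains (p.2, p.1) then PySem.Set.add (PySem.Set.add m p.1) p.2 else m)
      PySem.Set.empty
  (PySem.List.pyRange 0 (2 * (PySem.Set.len rs : Int) + 2) 1).filter (fun i => mtl.contains i)

-- ===== PORT B =====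
-- canonical unordered key of an ordered pair: (x, y) if x <= y else (y, x)
def pvCanon (p : Int × Int) : Int × Int := if p.1 ≤ p.2 then p else (p.2, p.1)

def solve_alt (relations : List (List Int)) : List Int :=
  let distinct : List (Int × Int) := PySem.List.dedup (relations.map pvPair)
  let cnt : PySem.Dict (Int × Int) Int :=
    distinct.foldl (fun d p => let k := pvCanon p; d.insert k (d.getD k 0 + 1)) PySem.Dict.empty
  let ends : List Int :=
    (cnt.items.filter (fun kc => kc.2 == 2 || kc.1.1 == kc.1.2)).flatMap
      (fun kc => [kc.1.1, kc.1.2])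
  let bound : Int := 2 * (distinct.length : Int) + 2
  PySem.List.sorted
    ((PySem.List.dedup ends).filter (fun v => decide (0 ≤ v) && decide (v < bound)))
    (fun v => v) false

-- ===== PRECONDITION & SPEC =====
-- Pre_ excludes inner lists whose length is not 2: there Python's 'for x, y in …' raises ValueError.
def Pre_solve (relations : List (List Int)) : Prop := ∀ l ∈ relations, l.length = 2
instance (relations : List (List Int)) : Decidable (Pre_solve relations) := by unfold Pre_solve; infer_instance
def pvWitness_solve : List (List Int) := [[1, 2], [2, 1], [3, 4]]

def Spec_solve (relations : List (List Int)) (out : List Int) : Prop := out = solve_alt relations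
instance (relations : List (List Int)) (out : List Int) : Decidable (Spec_solve relations out) := by unfold Spec_solve; infer_instance

-- ===== CLAIM (what is proved, stated in full; the proofs are below) =====
def Claim_equal_solve : Prop := ∀ (relations : List (List Int)), Dom_solve relations → Pre_solve relations → Spec_solve relations (solve relations)

-- ===== LEMMAS AND PROOFS =====

-- canonical key facts
theorem canon_fst_le_snd (p : Int × Int) : (pvCanon p).1 ≤ (pvCanon p).2 := by
  unfold pvCanon; split_ifs with h
  · exact h
  · omega

theorem canon_cases (p k : Int × Int) (h : pvCanon p = k) : p = k ∨ p = (k.2, k.1) := by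
  unfold pvCanon at h
  split_ifs at h
  · exact Or.inl h
  · subst h; exact Or.inr rfl

theorem canon_swap (p : Int × Int) : pvCanon (p.2, p.1) = pvCanon p := by
  obtain ⟨a, b⟩ := p
  unfold pvCanon
  split_ifs with h1 h2 h2 <;> simp_all <;> omega

theorem canon_self (p : Int × Int) (h : p.1 ≤ p.2) : pvCanon p = p := by
  unfold pvCanon; rw [if_pos h]

-- a Nodup list inside a two-element set has length at most 2
theorem nodup_len_le_two (l : List (Int × Int)) (a b : Int × Int) (hnd : l.Nodup)
    (h : ∀ x ∈ l, x = a ∨ x = b) : l.length ≤ 2 := by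
  have hsub : l.toFinset ⊆ {a, b} := by
    intro x hx
    rcases h x (List.mem_toFinset.mp hx) with rfl | rfl <;> simp
  calc l.length = l.toFinset.card := (List.toFinset_card_of_nodup hnd).symm
    _ ≤ ({a, b} : Finset (Int × Int)).card := Finset.card_le_card hsub
    _ ≤ 2 := by
      calc ({a, b} : Finset (Int × Int)).card ≤ ({b} : Finset (Int × Int)).card + 1 :=
            Finset.card_insert_le _ _
        _ ≤ 2 := by simp

-- the multiplicity of a canonical key among Nodup ordered pairs is 2 iff both orientations occur
theorem count_canon_eq_two (D : List (Int × Int)) (hD : D.Nodup) (k : Int × Int)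
    (hk : k.1 ≤ k.2) :
    (D.map pvCanon).count k = 2 ↔ k.1 ≠ k.2 ∧ k ∈ D ∧ (k.2, k.1) ∈ D := by
  rw [List.count_eq_countP, List.countP_map, List.countP_eq_length_filter]
  set F := D.filter ((fun x => x == k) ∘ pvCanon) with hF
  have hFnd : F.Nodup := hD.filter _
  have hFsub : ∀ x ∈ F, x = k ∨ x = (k.2, k.1) := by
    intro x hx
    have := (List.mem_filter.mp hx).2
    exact canon_cases x k (by simpa [Function.comp] using this)
  have hmemF : ∀ x, x ∈ F ↔ x ∈ D ∧ pvCanon x = k := by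
    intro x; rw [hF, List.mem_filter]; simp [Function.comp]
  constructor
  · intro h2
    have hne : k.1 ≠ k.2 := by
      intro he
      have hall : ∀ x ∈ F, x = k := by
        intro x hx
        rcases hFsub x hx with rfl | rfl
        · rfl
        · obtain ⟨k1, k2⟩ := k; simp at he ⊢; omega
      have : F.length ≤ 2 := nodup_len_le_two F k k hFnd (fun x hx => Or.inl (hall x hx))
      -- stronger: all elements equal k and Nodup forces length ≤ 1
      have hle1 : F.length ≤ 1 := by
        rcases F with _ | ⟨x, _ | ⟨y, t⟩⟩
        · simp
        · simp
        · exfalso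
          have hx : x = k := hall x (by simp)
          have hy : y = k := hall y (by simp)
          subst hx; subst hy
          simp at hFnd
      omega
    refine ⟨hne, ?_, ?_⟩
    · by_contra hkD
      have hall : ∀ x ∈ F, x = (k.2, k.1) := by
        intro x hx
        rcases hFsub x hx with rfl | rfl
        · exact absurd ((hmemF x).mp hx).1 (by simpa using hkD)
        · rfl
      have hle1 : F.length ≤ 1 := by
        rcases F with _ | ⟨x, _ | ⟨y, t⟩⟩
        · simp
        · simp
        · exfalso
          have hx := hall x (by simp)
          have hy := hall y (by simp)
          subst hx; rw [hy] at hFnd; simp at hFnd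
      omega
    · by_contra hkD
      have hall : ∀ x ∈ F, x = k := by
        intro x hx
        rcases hFsub x hx with rfl | rfl
        · rfl
        · exact absurd ((hmemF _).mp hx).1 (by simpa using hkD)
      have hle1 : F.length ≤ 1 := by
        rcases F with _ | ⟨x, _ | ⟨y, t⟩⟩
        · simp
        · simp
        · exfalso
          have hx := hall x (by simp)
          have hy := hall y (by simp)
          subst hx; rw [hy] at hFnd; simp at hFnd
      omega
  · rintro ⟨hne, hkD, hkrD⟩
    have hkk : k ≠ (k.2, k.1) := by
      obtain ⟨k1, k2⟩ := k; simp at hne ⊢; omega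
    have hkF : k ∈ F := (hmemF k).mpr ⟨hkD, canon_self k hk⟩
    have hkrF : (k.2, k.1) ∈ F := by
      refine (hmemF _).mpr ⟨hkrD, ?_⟩
      have := canon_swap k
      rw [this, canon_self k hk]
    have hle : F.length ≤ 2 := nodup_len_le_two F k (k.2, k.1) hFnd hFsub
    have hge : 2 ≤ F.length := by
      have hsub : ({k, (k.2, k.1)} : Finset (Int × Int)) ⊆ F.toFinset := by
        intro x hx
        simp only [Finset.mem_insert, Finset.mem_singleton] at hx
        rcases hx with rfl | rfl <;> exact List.mem_toFinset.mpr ‹_›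
      have hcard : ({k, (k.2, k.1)} : Finset (Int × Int)).card = 2 := by
        rw [Finset.card_insert_of_notMem (by simpa using hkk)]; simp
      calc 2 = ({k, (k.2, k.1)} : Finset (Int × Int)).card := hcard.symm
        _ ≤ F.toFinset.card := Finset.card_le_card hsub
        _ = F.length := List.toFinset_card_of_nodup hFnd
    omega

-- membership in A's accumulated 'mutual' set
theorem mem_mutualA (rs : PySem.Set (Int × Int)) (l : List (Int × Int)) (m : PySem.Set Int) (a : Int) :
    (a ∈ l.foldl (fun m p =>
        if rs.contains (p.2, p.1) then PySem.Set.add (PySem.Set.add m p.1) p.2 else m) m) ↔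
      a ∈ m ∨ ∃ p ∈ l, (p.2, p.1) ∈ rs ∧ (a = p.1 ∨ a = p.2) := by
  induction l generalizing m with
  | nil => simp
  | cons q t ih =>
    simp only [List.foldl_cons]
    by_cases h : (q.2, q.1) ∈ rs
    · rw [if_pos (by simp [h]), ih]
      simp only [PySem.Set.mem_add]
      constructor
      · rintro (((hm | h1) | h2) | ⟨p, hp, hr, he⟩)
        · exact Or.inl hm
        · exact Or.inr ⟨q, List.mem_cons_self, h, Or.inl h1⟩
        · exact Or.inr ⟨q, List.mem_cons_self, h, Or.inr h2⟩
        · exact Or.inr ⟨p, List.mem_cons_of_mem _ hp, hr, he⟩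
      · rintro (hm | ⟨p, hp, hr, he⟩)
        · exact Or.inl (Or.inl (Or.inl hm))
        · rcases List.mem_cons.mp hp with rfl | hp'
          · rcases he with rfl | rfl
            · exact Or.inl (Or.inl (Or.inr rfl))
            · exact Or.inl (Or.inr rfl)
          · exact Or.inr ⟨p, hp', hr, he⟩
    · rw [if_neg (by simp [h]), ih]
      constructor
      · rintro (hm | ⟨p, hp, hr, he⟩)
        · exact Or.inl hm
        · exact Or.inr ⟨p, List.mem_cons_of_mem _ hp, hr, he⟩
      · rintro (hm | ⟨p, hp, hr, he⟩)
        · exact Or.inl hm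
        · rcases List.mem_cons.mp hp with rfl | hp'
          · exact absurd hr h
          · exact Or.inr ⟨p, hp', hr, he⟩

-- B's 'ends' list holds exactly the endpoints of mutual pairs of a Nodup pair list
theorem canon_eq_or (p : Int × Int) : pvCanon p = p ∨ pvCanon p = (p.2, p.1) := by
  unfold pvCanon; split_ifs
  · exact Or.inl rfl
  · exact Or.inr rfl

theorem canon_diag (p : Int × Int) (h : (pvCanon p).1 = (pvCanon p).2) :
    p.1 = p.2 ∧ pvCanon p = p := by
  obtain ⟨a, b⟩ := p
  unfold pvCanon at *
  split_ifs at * <;> simp_all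

theorem mem_ends_iff (D : List (Int × Int)) (hD : D.Nodup) (v : Int) :
    (v ∈ ((PySem.Set.ofList (D.map pvCanon)).map
          (fun k => (k, ((D.map pvCanon).count k : Int))) |>.filter
        (fun kc => kc.2 == 2 || kc.1.1 == kc.1.2)).flatMap (fun kc => [kc.1.1, kc.1.2])) ↔
      ∃ p ∈ D, (p.2, p.1) ∈ D ∧ (v = p.1 ∨ v = p.2) := by
  simp only [List.mem_flatMap, List.mem_filter, List.mem_map, PySem.Set.mem_ofList,
    Bool.or_eq_true, beq_iff_eq, List.mem_cons, List.not_mem_nil, or_false]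
  constructor
  · rintro ⟨kc, ⟨⟨k, ⟨p, hpD, rfl⟩, rfl⟩, hcond⟩, hv⟩
    simp only at hcond hv
    set k := pvCanon p with hk
    have hkle : k.1 ≤ k.2 := canon_fst_le_snd p
    rcases hcond with hc2 | hkk
    · have hc2' : (D.map pvCanon).count k = 2 := by exact_mod_cast hc2
      obtain ⟨hne, hkD, hkrD⟩ := (count_canon_eq_two D hD k hkle).mp hc2'
      exact ⟨k, hkD, hkrD, hv⟩
    · -- self-loop key: the only preimage is (k.1, k.1) = k itself
      obtain ⟨hpp, hcp⟩ := canon_diag p hkk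
      refine ⟨p, hpD, ?_, ?_⟩
      · have : (p.2, p.1) = p := by obtain ⟨a, b⟩ := p; simp_all
        rwa [this]
      · rw [hk, hcp] at hv; exact hv
  · rintro ⟨p, hpD, hprD, hv⟩
    set k := pvCanon p with hk
    refine ⟨(k, ((D.map pvCanon).count k : Int)), ⟨⟨k, ⟨p, hpD, rfl⟩, rfl⟩, ?_⟩, ?_⟩
    · simp only
      by_cases hpp : p.1 = p.2
      · right
        rcases canon_eq_or p with h | h <;> rw [← hk] at h <;> rw [h] <;> simp [hpp]
      · left
        have hkle : k.1 ≤ k.2 := canon_fst_le_snd p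
        have hor : (k = p ∧ (k.2, k.1) = (p.2, p.1)) ∨ (k = (p.2, p.1) ∧ (k.2, k.1) = p) := by
          rcases canon_eq_or p with h | h <;> rw [← hk] at h
          · exact Or.inl ⟨h, by rw [h]⟩
          · exact Or.inr ⟨h, by rw [h]⟩
        have hne : k.1 ≠ k.2 := by
          rcases hor with ⟨h1, _⟩ | ⟨h1, _⟩ <;> rw [h1] <;> simpa using fun hq => hpp (by omega)
        have hkD : k ∈ D ∧ (k.2, k.1) ∈ D := by
          rcases hor with ⟨h1, h2⟩ | ⟨h1, h2⟩
          · exact ⟨h1 ▸ hpD, h2 ▸ hprD⟩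
          · exact ⟨h1 ▸ hprD, h2 ▸ hpD⟩
        have := (count_canon_eq_two D hD k hkle).mpr ⟨hne, hkD.1, hkD.2⟩
        exact_mod_cast this
    · simp only
      rcases canon_eq_or p with h | h <;> rw [← hk] at h <;> rw [h] <;> tauto

theorem solve_spec_aux (relations : List (List Int)) :
    solve relations = solve_alt relations := by
  have hDnd : (PySem.Set.ofList (relations.map pvPair)).Nodup := PySem.Set.nodup_ofList _
  have hcnt : (List.foldl (fun d p => d.insert (pvCanon p) (d.getD (pvCanon p) 0 + 1))
      PySem.Dict.empty (PySem.Set.ofList (relations.map pvPair)))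
      = PySem.Dict.counter ((PySem.Set.ofList (relations.map pvPair)).map pvCanon) := by
    have h := PySem.Dict.foldl_insert_getD_add_one_eq_counter
      ((PySem.Set.ofList (relations.map pvPair)).map pvCanon)
    rw [List.foldl_map] at h
    exact h
  unfold solve solve_alt
  simp only [PySem.List.dedup_eq_ofList]
  rw [hcnt, PySem.Dict.items_counter]
  apply Eq.symm
  apply PySem.List.sorted_eq_of_perm_of_pairwise_lt
  · rw [List.perm_ext_iff_of_nodup
      ((PySem.List.nodup_pyRange_one _ _).filter _)
      ((PySem.Set.nodup_ofList _).filter _)]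
    intro a
    have hA := mem_mutualA (PySem.Set.ofList (relations.map pvPair))
      (PySem.Set.ofList (relations.map pvPair)) PySem.Set.empty a
    have hB := mem_ends_iff (PySem.Set.ofList (relations.map pvPair)) hDnd a
    simp only [PySem.Set.empty, List.not_mem_nil, false_or] at hA
    simp only [List.mem_filter, PySem.List.mem_pyRange_one, Bool.and_eq_true,
      decide_eq_true_eq, PySem.Set.contains_eq_listContains, List.contains_iff_mem,
      PySem.Set.mem_ofList, PySem.Set.len, PySem.Set.empty] at hA hB ⊢
    rw [hA, hB]
    exact and_comm
  · exact (PySem.List.pairwise_lt_pyRange_one _ _).filter _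

-- ===== VERDICT (by name: the statement is the Claim_ definition above) =====
theorem solve_spec : Claim_equal_solve := by
  intro relations _ _
  exact solve_spec_aux relations
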